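-- pv_equiv track=rewrite | github.com/Min032/Tabu-Search | Tabu dame.py | selektuj_najbolji_potez
-- ===== SOURCE A (Python) =====
-- def izracunaj_broj_prekrsaja(konfiguracija):
--     n = len(konfiguracija)
--     brojac = 0
--     for i in range(n):
--         for j in range(i + 1, n):
--             # Ako se dve dame nalaze na istoj horizontali, to je prekrsaj.
--             if konfiguracija[i][1] == konfiguracija[j][1]:
--                  brojac += 1
--             # Provera dijagonala paralelnih glavnoj dijagonali.
--             if konfiguracija[i][1] - (i+1) == konfiguracija[j][1] - (j+1):
--                 brojac += 1
--             # Provera dijagonala paralelnih sporednoj dijagonali.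
--             if konfiguracija[i][1] + (i+1) == konfiguracija[j][1] + (j+1):
--                 brojac += 1
--     return brojac
--
-- def selektuj_najbolji_potez(okolina, konfiguracija):
--     najbolji_potez = okolina[0]
--     nova_konfiguracija = [(d, p) if d!=okolina[0][0] else okolina[0] for (d, p) in konfiguracija]
--     min_prekrsaja = izracunaj_broj_prekrsaja(nova_konfiguracija)
--     for i in range(1, len(okolina)):
--         trenutni_potez = okolina[i]
--         nova_konfiguracija = [(d, p) if d!=trenutni_potez[0] else trenutni_potez for (d, p) in konfiguracija]
--         br_prekrsaja = izracunaj_broj_prekrsaja(nova_konfiguracija)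
--         if br_prekrsaja < min_prekrsaja:
--             najbolji_potez = trenutni_potez
--             min_prekrsaja = br_prekrsaja
--
--     return najbolji_potez
-- ===== SOURCE B (Python) =====
-- def selektuj_najbolji_potez(okolina, konfiguracija):
--     # Score a move in O(n): count same-column / same-diagonal queens with one
--     # counter dict of tagged keys; each collision with an earlier queen adds 1.
--     def score(potez):
--         cnt = {}
--         acc = 0
--         for i, (d, p) in enumerate(konfiguracija):
--             c = potez[1] if d == potez[0] else p
--             for k in ((0, c), (1, c - i - 1), (2, c + i + 1)):
--                 acc += cnt.get(k, 0)
--                 cnt[k] = cnt.get(k, 0) + 1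
--         return acc
--     return min(okolina, key=score)
-- ===== Notes on version B (the rewrite author's own statement) =====
-- stated objective: faster
-- what changed: Each move is scored in one pass with a counter dict over tagged column/diagonal keys (each queen adds the number of earlier queens sharing a key) instead of the O(n^2) all-pairs conflict scan, and the best move is picked with min(okolina, key=score) instead of an explicit best/min loop.
import Mathlib
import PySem

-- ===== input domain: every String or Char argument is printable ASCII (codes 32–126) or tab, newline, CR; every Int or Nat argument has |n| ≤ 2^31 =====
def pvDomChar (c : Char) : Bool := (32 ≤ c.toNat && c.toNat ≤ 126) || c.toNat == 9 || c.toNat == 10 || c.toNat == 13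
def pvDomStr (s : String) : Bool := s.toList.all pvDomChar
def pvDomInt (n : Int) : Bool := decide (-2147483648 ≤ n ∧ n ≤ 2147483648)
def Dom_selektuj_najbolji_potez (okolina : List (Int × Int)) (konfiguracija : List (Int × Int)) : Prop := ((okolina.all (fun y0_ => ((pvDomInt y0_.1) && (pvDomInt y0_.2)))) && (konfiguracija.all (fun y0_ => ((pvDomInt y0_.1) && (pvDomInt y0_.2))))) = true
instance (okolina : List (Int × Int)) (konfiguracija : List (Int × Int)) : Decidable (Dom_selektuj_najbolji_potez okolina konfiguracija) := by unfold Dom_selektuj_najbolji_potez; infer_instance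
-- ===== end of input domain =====

-- B scores each move in one linear pass with a counter dict over tagged
-- column/diagonal keys instead of A's all-pairs conflict scan, and selects
-- the move with min-by-key (first minimum, like A's strict-< update loop).

-- ===== PORT A =====
def izracunaj_broj_prekrsaja (konfiguracija : List (Int × Int)) : Int :=
  let n : Int := konfiguracija.length
  (PySem.List.pyRange 0 n 1).foldl (fun brojac i =>
    (PySem.List.pyRange (i + 1) n 1).foldl (fun b j =>
      let ki := (PySem.List.pyGetD konfiguracija i (0, 0)).2
      let kj := (PySem.List.pyGetD konfiguracija j (0, 0)).2
      let b := if ki = kj then b + 1 else b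
      let b := if ki - (i + 1) = kj - (j + 1) then b + 1 else b
      if ki + (i + 1) = kj + (j + 1) then b + 1 else b) brojac) 0

def selektuj_najbolji_potez (okolina : List (Int × Int)) (konfiguracija : List (Int × Int)) : Int × Int :=
  let najbolji_potez := PySem.List.pyGetD okolina 0 (0, 0)
  let nova_konfiguracija := konfiguracija.map (fun dp => if dp.1 ≠ najbolji_potez.1 then dp else najbolji_potez)
  let min_prekrsaja := izracunaj_broj_prekrsaja nova_konfiguracija
  ((PySem.List.pyRange 1 okolina.length 1).foldl (fun (s : (Int × Int) × Int) i =>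
      let trenutni_potez := PySem.List.pyGetD okolina i (0, 0)
      let nova_konfiguracija := konfiguracija.map (fun dp => if dp.1 ≠ trenutni_potez.1 then dp else trenutni_potez)
      let br_prekrsaja := izracunaj_broj_prekrsaja nova_konfiguracija
      if br_prekrsaja < s.2 then (trenutni_potez, br_prekrsaja) else s)
    (najbolji_potez, min_prekrsaja)).1

-- ===== PORT B =====
def pvTriple (i : Int) (c : Int) : List (Int × Int) := [(0, c), (1, c - i - 1), (2, c + i + 1)]

def pvScore (konfiguracija : List (Int × Int)) (potez : Int × Int) : Int :=
  ((PySem.List.enumerate konfiguracija 0).foldl (fun s idp =>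
      let c := if idp.2.1 = potez.1 then potez.2 else idp.2.2
      (pvTriple idp.1 c).foldl (fun s2 k => (s2.1 + s2.2.getD k 0, s2.2.modify k 0 (· + 1))) s)
    ((0 : Int), (PySem.Dict.empty : PySem.Dict (Int × Int) Int))).1

def selektuj_najbolji_potez_alt (okolina : List (Int × Int)) (konfiguracija : List (Int × Int)) : Int × Int :=
  match PySem.List.min? okolina (pvScore konfiguracija) with
  | some m => m
  | none => (0, 0)  -- unreachable under Pre_ (Python's min raises ValueError on [])

-- ===== PRECONDITION & SPEC =====
-- A indexes okolina[0] (IndexError on []) and B's min raises ValueError there.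
def Pre_selektuj_najbolji_potez (okolina : List (Int × Int)) (konfiguracija : List (Int × Int)) : Prop := okolina ≠ []
instance (okolina : List (Int × Int)) (konfiguracija : List (Int × Int)) : Decidable (Pre_selektuj_najbolji_potez okolina konfiguracija) := by unfold Pre_selektuj_najbolji_potez; infer_instance
def pvWitness_selektuj_najbolji_potez : (List (Int × Int)) × (List (Int × Int)) := ([(1, 2)], [(1, 1), (2, 3)])

def Spec_selektuj_najbolji_potez (okolina : List (Int × Int)) (konfiguracija : List (Int × Int)) (out : Int × Int) : Prop := out = selektuj_najbolji_potez_alt okolina konfiguracija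
instance (okolina : List (Int × Int)) (konfiguracija : List (Int × Int)) (out : Int × Int) : Decidable (Spec_selektuj_najbolji_potez okolina konfiguracija out) := by unfold Spec_selektuj_najbolji_potez; infer_instance

-- ===== CLAIM (what is proved, stated in full; the proofs are below) =====
def Claim_equal_selektuj_najbolji_potez : Prop := ∀ (okolina : List (Int × Int)) (konfiguracija : List (Int × Int)), Dom_selektuj_najbolji_potez okolina konfiguracija → Pre_selektuj_najbolji_potez okolina konfiguracija → Spec_selektuj_najbolji_potez okolina konfiguracija (selektuj_najbolji_potez okolina konfiguracija)

-- ===== LEMMAS AND PROOFS =====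

-- A's per-pair conflict tests, over (index, queen) pairs.
def pvTests (p q : Int × (Int × Int)) : Int :=
  (if p.2.2 = q.2.2 then 1 else 0)
  + (if p.2.2 - (p.1 + 1) = q.2.2 - (q.1 + 1) then 1 else 0)
  + (if p.2.2 + (p.1 + 1) = q.2.2 + (q.1 + 1) then 1 else 0)

-- reference form of A's double loop over the enumerated configuration
def pvGA : List (Int × (Int × Int)) → Int
  | [] => 0
  | p :: rest => (rest.map (pvTests p)).sum + pvGA rest

-- reference pair count on key streams (B's counter loop computes this)
def pvGK : List (Int × Int) → Int
  | [] => 0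
  | k :: rest => (rest.count k : Int) + pvGK rest

theorem pv_map_pair_pyRange (xs : List (Int × Int)) (a : Nat) (h : a ≤ xs.length) :
    (PySem.List.pyRange (a : Int) (xs.length : Int) 1).map
        (fun j => (j, PySem.List.pyGetD xs j (0, 0)))
      = PySem.List.enumerate (xs.drop a) a := by
  apply List.ext_getElem
  · simp [PySem.List.length_pyRange_one, PySem.List.length_enumerate]
  · intro k h1 h2
    have hk : k < xs.length - a := by
      simp [PySem.List.length_pyRange_one] at h1; omega
    rw [List.getElem_map, PySem.List.getElem_pyRange_one, PySem.List.getElem_enumerate,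
      List.getElem_drop]
    rw [PySem.List.pyGetD_eq_getElem xs (0, 0) (by omega) (by omega)]
    have h3 : ((a : Int) + (k : Int)).toNat = a + k := by omega
    simp [h3]

theorem pv_sum_enum_drop (xs : List (Int × Int)) : ∀ (s : Nat),
    ((List.range xs.length).map (fun k =>
        ((PySem.List.enumerate (xs.drop (k + 1)) (s + k + 1)).map
          (pvTests ((s + k : Nat), xs.getD k (0, 0)))).sum)).sum
      = pvGA (PySem.List.enumerate xs s) := by
  induction xs with
  | nil => intro s; simp [pvGA, PySem.List.enumerate_nil]
  | cons x t ih =>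
    intro s
    rw [List.length_cons, List.range_succ_eq_map, List.map_cons, List.map_map, List.sum_cons]
    rw [PySem.List.enumerate_cons, pvGA]
    congr 1
    · have hcast : ((s : Int) + 1) = ((s + 1 : Nat) : Int) := by push_cast; ring
      rw [hcast, ← ih (s + 1)]
      apply congrArg
      apply List.map_congr_left
      intro k _
      simp only [Function.comp_apply, Nat.succ_eq_add_one]
      simp only [List.getD_cons_succ, List.drop_succ_cons]
      congr 2 <;> push_cast <;> ring_nf

-- A's conflict counter equals the reference pair-test sum over the enumeration.
theorem pv_izracunaj_eq_gA (xs : List (Int × Int)) :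
    izracunaj_broj_prekrsaja xs = pvGA (PySem.List.enumerate xs 0) := by
  unfold izracunaj_broj_prekrsaja
  have hbody : ∀ (i j b : Int),
      (let ki := (PySem.List.pyGetD xs i (0, 0)).2
       let kj := (PySem.List.pyGetD xs j (0, 0)).2
       let b := if ki = kj then b + 1 else b
       let b := if ki - (i + 1) = kj - (j + 1) then b + 1 else b
       if ki + (i + 1) = kj + (j + 1) then b + 1 else b)
      = b + pvTests (i, PySem.List.pyGetD xs i (0, 0)) (j, PySem.List.pyGetD xs j (0, 0)) := by
    intro i j b
    simp only [pvTests]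
    split_ifs <;> ring
  simp only [hbody, PySem.List.foldl_add]
  rw [PySem.List.pyRange_one]
  simp only [List.map_map]
  have hmain := pv_sum_enum_drop xs 0
  rw [show ((0 : Nat) : Int) = (0 : Int) from rfl] at hmain
  rw [← hmain, zero_add]
  apply congrArg
  apply List.map_congr_left
  intro k hk
  have hklen : k < xs.length := by
    have := List.mem_range.mp hk
    omega
  simp only [Function.comp_apply]
  simp only [zero_add, PySem.List.pyGetD_natCast]
  have hp := pv_map_pair_pyRange xs (k + 1) (by omega)
  push_cast at hp
  rw [← hp, List.map_map]
  rfl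

-- the three tagged keys of one queen never collide with each other, and across
-- queens they collide exactly when one of A's three pair tests fires
theorem pv_key (p q : Int × (Int × Int)) :
    (([((0:Int), q.2.2), (1, q.2.2 - q.1 - 1), (2, q.2.2 + q.1 + 1)].count ((0:Int), p.2.2) : Int)
    + ((([((0:Int), q.2.2), (1, q.2.2 - q.1 - 1), (2, q.2.2 + q.1 + 1)].count ((1:Int), p.2.2 - p.1 - 1)) : Int)
    + (([((0:Int), q.2.2), (1, q.2.2 - q.1 - 1), (2, q.2.2 + q.1 + 1)].count ((2:Int), p.2.2 + p.1 + 1)) : Int)))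
    = pvTests p q := by
  simp only [List.count_cons, List.count_nil, beq_iff_eq, Prod.mk.injEq, pvTests]
  norm_num
  split_ifs <;> omega

theorem pv_gK_flatMap (l : List (Int × (Int × Int))) :
    pvGK (l.flatMap (fun p => pvTriple p.1 p.2.2)) = pvGA l := by
  induction l with
  | nil => simp [pvGK, pvGA]
  | cons p rest ih =>
    rw [List.flatMap_cons, pvGA, ← ih]
    simp only [pvTriple, List.cons_append, List.nil_append] at *
    rw [pvGK, pvGK, pvGK]
    have c1 : ∀ (R : List (Int × Int)) (c c' i' : Int),
        ((((1 : Int), c') :: (2, i') :: R).count ((0 : Int), c) : Int) = (R.count (0, c) : Int) := by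
      intro R c c' i'
      simp
    have c2 : ∀ (R : List (Int × Int)) (c i' : Int),
        ((((2 : Int), i') :: R).count ((1 : Int), c) : Int) = (R.count (1, c) : Int) := by
      intro R c i'
      simp
    rw [c1, c2]
    have hcnt : ∀ (tag v : Int),
        ((rest.flatMap (fun p => [((0:Int), p.2.2), (1, p.2.2 - p.1 - 1), (2, p.2.2 + p.1 + 1)])).count (tag, v) : Int)
          = (rest.map (fun q => (([((0:Int), q.2.2), (1, q.2.2 - q.1 - 1), (2, q.2.2 + q.1 + 1)].count (tag, v)) : Int))).sum := by
      intro tag v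
      rw [List.count_flatMap]
      push_cast
      rw [List.map_map]
      rfl
    rw [hcnt, hcnt, hcnt]
    have hsum : (rest.map (fun q => (([((0:Int), q.2.2), (1, q.2.2 - q.1 - 1), (2, q.2.2 + q.1 + 1)].count ((0:Int), p.2.2)) : Int))).sum
        + ((rest.map (fun q => (([((0:Int), q.2.2), (1, q.2.2 - q.1 - 1), (2, q.2.2 + q.1 + 1)].count ((1:Int), p.2.2 - p.1 - 1)) : Int))).sum
        + (rest.map (fun q => (([((0:Int), q.2.2), (1, q.2.2 - q.1 - 1), (2, q.2.2 + q.1 + 1)].count ((2:Int), p.2.2 + p.1 + 1)) : Int))).sum)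
        = (rest.map (pvTests p)).sum := by
      rw [← List.sum_map_add, ← List.sum_map_add]
      apply congrArg
      apply List.map_congr_left
      intro q _
      exact pv_key p q
    rw [← hsum]
    ring

theorem pv_crossD_modify (t : List (Int × Int)) (x : Int × Int) (d : PySem.Dict (Int × Int) Int) :
    (t.map (fun k => (d.modify x 0 (· + 1)).getD k 0)).sum
      = (t.map (fun k => d.getD k 0)).sum + (t.count x : Int) := by
  induction t with
  | nil => simp
  | cons y t ih =>
    simp only [List.map_cons, List.sum_cons, List.count_cons, ih]
    rw [PySem.Dict.getD_modify]
    by_cases h : y = x <;> simp [h] <;> ring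

-- the counter-dict loop computes the pair count of its key stream
theorem pv_fold_counter (l : List (Int × Int)) : ∀ (acc : Int) (d : PySem.Dict (Int × Int) Int),
    (l.foldl (fun s k => (s.1 + s.2.getD k 0, s.2.modify k 0 (· + 1))) (acc, d)).1
      = acc + (l.map (fun k => d.getD k 0)).sum + pvGK l := by
  induction l with
  | nil => intro acc d; simp [pvGK]
  | cons k t ih =>
    intro acc d
    rw [List.foldl_cons, ih, pvGK]
    rw [List.map_cons, List.sum_cons, pv_crossD_modify]
    ring

theorem pv_score_flat (konf : List (Int × Int)) (t : Int × Int) :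
    pvScore konf t
      = pvGK ((PySem.List.enumerate konf 0).flatMap
          (fun p => pvTriple p.1 (if p.2.1 = t.1 then t.2 else p.2.2))) := by
  unfold pvScore
  rw [← List.foldl_flatMap, pv_fold_counter]
  simp [PySem.Dict.getD_empty]

theorem pv_enumerate_map (f : (Int × Int) → (Int × Int)) (xs : List (Int × Int)) :
    ∀ (s : Int), PySem.List.enumerate (xs.map f) s
      = (PySem.List.enumerate xs s).map (fun p => (p.1, f p.2)) := by
  induction xs with
  | nil => intro s; simp [PySem.List.enumerate_nil]
  | cons x t ih => intro s; simp [PySem.List.enumerate_cons, ih]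

-- A's score of the move-applied configuration is B's counter score
theorem pv_score_eq (konf : List (Int × Int)) (t : Int × Int) :
    izracunaj_broj_prekrsaja (konf.map (fun dp => if dp.1 ≠ t.1 then dp else t))
      = pvScore konf t := by
  rw [pv_izracunaj_eq_gA, ← pv_gK_flatMap, pv_enumerate_map, List.flatMap_map, pv_score_flat]
  apply congrArg
  have hfun : (fun (a : Int × (Int × Int)) => pvTriple (a.1, if a.2.1 ≠ t.1 then a.2 else t).1 (a.1, if a.2.1 ≠ t.1 then a.2 else t).2.2)
      = (fun (p : Int × (Int × Int)) => pvTriple p.1 (if p.2.1 = t.1 then t.2 else p.2.2)) := by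
    funext p
    by_cases h : p.2.1 = t.1 <;> simp [h]
  rw [hfun]

-- A's explicit best/min loop is min-by-key (first minimum)
theorem pv_min_cons (key : (Int × Int) → Int) (tail : List (Int × Int)) : ∀ (b : Int × Int),
    PySem.List.min? (b :: tail) key
      = some ((tail.foldl (fun s y => if key y < s.2 then (y, key y) else s) (b, key b)).1) := by
  induction tail with
  | nil => intro b; rfl
  | cons y t ih =>
    intro b
    have step : PySem.List.min? (b :: y :: t) key
        = PySem.List.min? ((if key y < key b then y else b) :: t) key := by
      unfold PySem.List.min?
      simp only [List.foldl_cons]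
      congr 1
      by_cases h : key y < key b <;> simp [h]
    by_cases h : key y < key b
    · rw [step, if_pos h, ih y, List.foldl_cons]
      simp [h]
    · rw [step, if_neg h, ih b, List.foldl_cons]
      simp [h]

-- ===== VERDICT (by name: the statement is the Claim_ definition above) =====
theorem selektuj_najbolji_potez_spec : Claim_equal_selektuj_najbolji_potez := by
  intro okolina konf _ hpre
  obtain ⟨x, tail, rfl⟩ := List.exists_cons_of_ne_nil hpre
  unfold Spec_selektuj_najbolji_potez selektuj_najbolji_potez selektuj_najbolji_potez_alt
  simp only [PySem.List.pyGetD_zero_cons, pv_score_eq]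
  rw [PySem.List.foldl_pyRange_pyGetD' (x :: tail) (0, 0)
    (fun (s : (Int × Int) × Int) (y : Int × Int) =>
      if pvScore konf y < s.2 then (y, pvScore konf y) else s) _ (by norm_num)]
  have hdrop : List.drop (Int.toNat 1) (x :: tail) = tail := by simp
  rw [hdrop]
  rw [pv_min_cons (pvScore konf) tail x]
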